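-- pv_equiv track=rewrite | github.com/eunomia-bpf/ebpf-verifier-agent | case_study/collect_rex_commits.py | render_file_snippets
-- ===== SOURCE A (Python) =====
-- def parse_hunks(diff_text: str) -> list[tuple[str, list[str], list[str]]]:
--     hunks: list[tuple[str, list[str], list[str]]] = []
--     header = ""
--     before_lines: list[str] = []
--     after_lines: list[str] = []
--     in_hunk = False
--
--     for raw_line in diff_text.splitlines():
--         if raw_line.startswith("@@"):
--             if in_hunk:
--                 hunks.append((header, before_lines, after_lines))
--             header = raw_line.split("@@")[-1].strip()
--             before_lines = []
--             after_lines = []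
--             in_hunk = True
--             continue
--         if not in_hunk:
--             continue
--         if raw_line.startswith("\\ No newline at end of file"):
--             continue
--         if raw_line.startswith("---") or raw_line.startswith("+++"):
--             continue
--         if raw_line.startswith(" "):
--             expanded = raw_line[1:].expandtabs(8)
--             before_lines.append(expanded)
--             after_lines.append(expanded)
--         elif raw_line.startswith("-"):
--             before_lines.append(raw_line[1:].expandtabs(8))
--         elif raw_line.startswith("+"):
--             after_lines.append(raw_line[1:].expandtabs(8))
--
--     if in_hunk:
--         hunks.append((header, before_lines, after_lines))
--     return hunks
--
-- def render_file_snippets(file_path: str, diff_text: str) -> tuple[str, str]: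
--     prefix = f"// FILE: {file_path}"
--     before_sections = [prefix]
--     after_sections = [prefix]
--     for index, (header, before_lines, after_lines) in enumerate(parse_hunks(diff_text), start=1):
--         if index > 1:
--             before_sections.append("")
--             after_sections.append("")
--         if header:
--             before_sections.append(f"// CONTEXT: {header}")
--             after_sections.append(f"// CONTEXT: {header}")
--         before_sections.extend(before_lines)
--         after_sections.extend(after_lines)
--     return "\n".join(before_sections).rstrip(), "\n".join(after_sections).rstrip()
-- ===== SOURCE B (Python) =====
-- def _expand(s: str) -> str:
--     return s.expandtabs(8)
--
--
-- def render_file_snippets(file_path: str, diff_text: str) -> tuple[str, str]: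
--     # Single streaming pass: no parse_hunks helper, no intermediate hunk list.
--     prefix = f"// FILE: {file_path}"
--     before = [prefix]
--     after = [prefix]
--     hunks_seen = 0
--     for raw in diff_text.splitlines():
--         if raw.startswith("@@"):
--             if hunks_seen:
--                 before.append("")
--                 after.append("")
--             header = raw.split("@@")[-1].strip()
--             if header:
--                 before.append(f"// CONTEXT: {header}")
--                 after.append(f"// CONTEXT: {header}")
--             hunks_seen += 1
--         elif hunks_seen == 0:
--             continue
--         elif (raw.startswith("\\ No newline at end of file")
--               or raw.startswith("---") or raw.startswith("+++")):
--             continue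
--         elif raw.startswith(" "):
--             expanded = _expand(raw[1:])
--             before.append(expanded)
--             after.append(expanded)
--         elif raw.startswith("-"):
--             before.append(_expand(raw[1:]))
--         elif raw.startswith("+"):
--             after.append(_expand(raw[1:]))
--     return "\n".join(before).rstrip(), "\n".join(after).rstrip()
-- ===== Notes on version B (the rewrite author's own statement) =====
-- stated objective: simpler
-- what changed: Replaced the two-phase design (parse_hunks builds an intermediate list of (header, before, after) hunk tuples, then a second enumerate loop renders it) with a single streaming pass that appends separator, context and code lines directly to the two output section lists as each diff line is read.
import Mathlib
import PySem

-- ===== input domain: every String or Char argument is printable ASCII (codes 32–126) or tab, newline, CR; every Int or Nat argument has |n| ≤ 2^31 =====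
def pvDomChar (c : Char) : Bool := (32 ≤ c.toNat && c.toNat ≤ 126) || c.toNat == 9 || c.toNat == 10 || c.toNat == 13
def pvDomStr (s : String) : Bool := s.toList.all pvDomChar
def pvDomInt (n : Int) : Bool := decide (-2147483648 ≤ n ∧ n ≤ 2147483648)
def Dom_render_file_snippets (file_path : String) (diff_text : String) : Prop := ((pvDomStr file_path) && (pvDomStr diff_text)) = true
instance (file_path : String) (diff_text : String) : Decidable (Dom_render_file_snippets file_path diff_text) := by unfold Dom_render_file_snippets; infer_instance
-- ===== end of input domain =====

-- B is a single streaming pass over the diff lines (no parse_hunks helper, no intermediate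
-- hunk list); objective: simpler one-pass decomposition, same return value.

-- shared primitive: s.expandtabs(8) — hand-ported (not in PySem); exact per CPython:
-- tab writes 8 - col % 8 spaces and advances col to the next tab stop, '\n'/'\r' reset col.
def pyExpandtabs8Go : List Char → Nat → List Char
  | [], _ => []
  | c :: rest, col =>
    if c = '\t' then
      List.replicate (8 - col % 8) ' ' ++ pyExpandtabs8Go rest (col + (8 - col % 8))
    else if c = '\n' ∨ c = '\r' then c :: pyExpandtabs8Go rest 0
    else c :: pyExpandtabs8Go rest (col + 1)

def pyExpandtabs8 (s : String) : String := String.ofList (pyExpandtabs8Go s.toList 0)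

-- shared primitive expression: raw_line.split("@@")[-1].strip()  (sep "@@" ≠ "", so split? is some)
def headerOf (raw : String) : String :=
  PySem.Str.strip (PySem.List.pyGetD ((PySem.Str.split? raw "@@").getD []) (-1) "")

-- raw[1:]
def tail1 (raw : String) : String := PySem.Str.slice raw (some 1) none

-- ===== PORT A =====
-- parse state: (hunks, header, before_lines, after_lines, in_hunk)
def parseStep (st : List (String × List String × List String) × String × List String × List String × Bool)
    (raw : String) : List (String × List String × List String) × String × List String × List String × Bool :=
  let (hunks, header, bl, al, inh) := st
  if PySem.Str.startswith raw "@@" then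
    let hunks := if inh then hunks ++ [(header, bl, al)] else hunks
    (hunks, headerOf raw, [], [], true)
  else if !inh then st
  else if PySem.Str.startswith raw "\\ No newline at end of file" then st
  else if PySem.Str.startswith raw "---" || PySem.Str.startswith raw "+++" then st
  else if PySem.Str.startswith raw " " then
    let e := pyExpandtabs8 (tail1 raw)
    (hunks, header, bl ++ [e], al ++ [e], inh)
  else if PySem.Str.startswith raw "-" then
    (hunks, header, bl ++ [pyExpandtabs8 (tail1 raw)], al, inh)
  else if PySem.Str.startswith raw "+" then
    (hunks, header, bl, al ++ [pyExpandtabs8 (tail1 raw)], inh)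
  else st

def parse_hunks (diff_text : String) : List (String × List String × List String) :=
  let fin := (PySem.Str.splitlines diff_text).foldl parseStep ([], "", [], [], false)
  if fin.2.2.2.2 then fin.1 ++ [(fin.2.1, fin.2.2.1, fin.2.2.2.1)] else fin.1

def renderStepA (acc : List String × List String)
    (p : Int × String × List String × List String) : List String × List String :=
  let acc := if p.1 > 1 then (acc.1 ++ [""], acc.2 ++ [""]) else acc
  let acc := if p.2.1 ≠ "" then
      (acc.1 ++ ["// CONTEXT: " ++ p.2.1], acc.2 ++ ["// CONTEXT: " ++ p.2.1]) else acc
  (acc.1 ++ p.2.2.1, acc.2 ++ p.2.2.2)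

def render_file_snippets (file_path : String) (diff_text : String) : String × String :=
  let pfx := "// FILE: " ++ file_path
  let sections := (PySem.List.enumerate (parse_hunks diff_text) 1).foldl renderStepA ([pfx], [pfx])
  (PySem.Str.rstrip (PySem.Str.join "\n" sections.1), PySem.Str.rstrip (PySem.Str.join "\n" sections.2))

-- ===== PORT B =====
-- streaming state: (before_sections, after_sections, hunks_seen)
def streamStep (st : List String × List String × Int) (raw : String) :
    List String × List String × Int :=
  let bs := st.1
  let as_ := st.2.1
  let n := st.2.2
  if PySem.Str.startswith raw "@@" then
    let bs := if n ≠ 0 then bs ++ [""] else bs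
    let as_ := if n ≠ 0 then as_ ++ [""] else as_
    let header := headerOf raw
    let bs := if header ≠ "" then bs ++ ["// CONTEXT: " ++ header] else bs
    let as_ := if header ≠ "" then as_ ++ ["// CONTEXT: " ++ header] else as_
    (bs, as_, n + 1)
  else if n = 0 then st
  else if PySem.Str.startswith raw "\\ No newline at end of file"
      || PySem.Str.startswith raw "---" || PySem.Str.startswith raw "+++" then st
  else if PySem.Str.startswith raw " " then
    let e := pyExpandtabs8 (tail1 raw)
    (bs ++ [e], as_ ++ [e], n)
  else if PySem.Str.startswith raw "-" then
    (bs ++ [pyExpandtabs8 (tail1 raw)], as_, n)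
  else if PySem.Str.startswith raw "+" then
    (bs, as_ ++ [pyExpandtabs8 (tail1 raw)], n)
  else st

def render_file_snippets_alt (file_path : String) (diff_text : String) : String × String :=
  let pfx := "// FILE: " ++ file_path
  let fin := (PySem.Str.splitlines diff_text).foldl streamStep ([pfx], [pfx], 0)
  (PySem.Str.rstrip (PySem.Str.join "\n" fin.1), PySem.Str.rstrip (PySem.Str.join "\n" fin.2.1))

-- ===== PRECONDITION & SPEC =====
def Spec_render_file_snippets (file_path : String) (diff_text : String) (out : String × String) : Prop := out = render_file_snippets_alt file_path diff_text
instance (file_path : String) (diff_text : String) (out : String × String) : Decidable (Spec_render_file_snippets file_path diff_text out) := by unfold Spec_render_file_snippets; infer_instance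

-- ===== CLAIM (what is proved, stated in full; the proofs are below) =====
def Claim_equal_render_file_snippets : Prop := ∀ (file_path : String) (diff_text : String), Dom_render_file_snippets file_path diff_text → Spec_render_file_snippets file_path diff_text (render_file_snippets file_path diff_text)

-- ===== LEMMAS AND PROOFS =====

-- the pair of section lists A's render loop produces from a given hunk list
def renderPair (p : String) (hs : List (String × List String × List String)) :
    List String × List String :=
  (PySem.List.enumerate hs 1).foldl renderStepA ([p], [p])

-- A's parse state with the pending hunk flushed (what parse_hunks would return from it)
def flushSt (st : List (String × List String × List String) × String × List String × List String × Bool) :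
    List (String × List String × List String) :=
  if st.2.2.2.2 then st.1 ++ [(st.2.1, st.2.2.1, st.2.2.2.1)] else st.1

-- the invariant tying A's parse state to B's streaming state
def InvAB (p : String)
    (sa : List (String × List String × List String) × String × List String × List String × Bool)
    (sb : List String × List String × Int) : Prop :=
  (sa.2.2.2.2 = false → sa.1 = []) ∧
  sb.2.2 = (flushSt sa).length ∧
  (sb.1, sb.2.1) = renderPair p (flushSt sa)

lemma renderPair_snoc (p : String) (hs : List (String × List String × List String))
    (h : String) (bl al : List String) :
    renderPair p (hs ++ [(h, bl, al)]) =
      ((renderPair p hs).1 ++ (if hs = [] then [] else [""])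
          ++ (if h ≠ "" then ["// CONTEXT: " ++ h] else []) ++ bl,
       (renderPair p hs).2 ++ (if hs = [] then [] else [""])
          ++ (if h ≠ "" then ["// CONTEXT: " ++ h] else []) ++ al) := by
  unfold renderPair
  rw [PySem.List.enumerate_append, List.foldl_append]
  generalize hacc : (PySem.List.enumerate hs 1).foldl renderStepA ([p], [p]) = acc
  simp only [PySem.List.enumerate, List.foldl, renderStepA]
  rcases acc with ⟨b, a⟩
  by_cases hnil : hs = [] <;> by_cases hh : h = "" <;>
    simp [hnil, hh, List.append_assoc, List.length_pos_iff]

lemma renderPair_grow_before (p : String) (hs : List (String × List String × List String))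
    (h : String) (bl al : List String) (e : String) :
    renderPair p (hs ++ [(h, bl ++ [e], al)]) =
      ((renderPair p (hs ++ [(h, bl, al)])).1 ++ [e], (renderPair p (hs ++ [(h, bl, al)])).2) := by
  rw [renderPair_snoc, renderPair_snoc]; simp [List.append_assoc]

lemma renderPair_grow_after (p : String) (hs : List (String × List String × List String))
    (h : String) (bl al : List String) (e : String) :
    renderPair p (hs ++ [(h, bl, al ++ [e])]) =
      ((renderPair p (hs ++ [(h, bl, al)])).1, (renderPair p (hs ++ [(h, bl, al)])).2 ++ [e]) := by
  rw [renderPair_snoc, renderPair_snoc]; simp [List.append_assoc]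

lemma renderPair_grow_both (p : String) (hs : List (String × List String × List String))
    (h : String) (bl al : List String) (e : String) :
    renderPair p (hs ++ [(h, bl ++ [e], al ++ [e])]) =
      ((renderPair p (hs ++ [(h, bl, al)])).1 ++ [e], (renderPair p (hs ++ [(h, bl, al)])).2 ++ [e]) := by
  rw [renderPair_snoc, renderPair_snoc]; simp [List.append_assoc]

lemma step_inv (p : String)
    (sa : List (String × List String × List String) × String × List String × List String × Bool)
    (sb : List String × List String × Int) (raw : String)
    (hI : InvAB p sa sb) : InvAB p (parseStep sa raw) (streamStep sb raw) := by
  obtain ⟨hs, h, bl, al, inh⟩ := sa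
  obtain ⟨bs, as_, n⟩ := sb
  obtain ⟨h0, h1, h2⟩ := hI
  simp only at h0 h1 h2
  by_cases hAt : PySem.Str.startswith raw "@@"
  · -- "@@" line: a new hunk starts
    simp at hAt
    cases inh with
    | false =>
      have hhs : hs = [] := h0 rfl
      subst hhs
      have hn0 : n = 0 := by simpa [flushSt] using h1
      subst hn0
      have h2' : (bs, as_) = renderPair p [] := by simpa [flushSt] using h2
      have eA : parseStep ([], h, bl, al, false) raw = ([], headerOf raw, [], [], true) := by
        simp [parseStep, hAt]
      rw [eA]; unfold InvAB
      have hsnoc := renderPair_snoc p [] (headerOf raw) [] []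
      simp only [List.nil_append] at hsnoc
      by_cases hh : headerOf raw = ""
      · have eB : streamStep (bs, as_, 0) raw = (bs, as_, 1) := by
          simp [streamStep, hAt, hh]
        rw [eB]
        refine ⟨?_, ?_, ?_⟩
        · intro hc; simp at hc
        · simp [flushSt]
        · simp [hh] at hsnoc
          simp [flushSt, hsnoc, hh, ← h2']
      · have eB : streamStep (bs, as_, 0) raw =
            (bs ++ ["// CONTEXT: " ++ headerOf raw], as_ ++ ["// CONTEXT: " ++ headerOf raw], 1) := by
          simp [streamStep, hAt, hh]
        rw [eB]
        refine ⟨?_, ?_, ?_⟩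
        · intro hc; simp at hc
        · simp [flushSt]
        · simp [hh] at hsnoc
          simp [flushSt, hsnoc, ← h2']
    | true =>
      have h1' : n = ((hs ++ [(h, bl, al)]).length : Int) := by simpa [flushSt] using h1
      have h2' : (bs, as_) = renderPair p (hs ++ [(h, bl, al)]) := by simpa [flushSt] using h2
      have hn : n ≠ 0 := by rw [h1']; simp; omega
      have eA : parseStep (hs, h, bl, al, true) raw =
          (hs ++ [(h, bl, al)], headerOf raw, [], [], true) := by
        simp [parseStep, hAt]
      rw [eA]; unfold InvAB
      have hsnoc := renderPair_snoc p (hs ++ [(h, bl, al)]) (headerOf raw) [] []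
      rw [if_neg (by simp)] at hsnoc
      simp only [List.append_nil] at hsnoc
      by_cases hh : headerOf raw = ""
      · have eB : streamStep (bs, as_, n) raw = (bs ++ [""], as_ ++ [""], n + 1) := by
          simp [streamStep, hAt, hh, hn]
        rw [eB]
        refine ⟨fun hc => by simp at hc, ?_, ?_⟩
        · simp only [flushSt, if_true]
          rw [h1']; simp; ring
        · simp [hh] at hsnoc
          simp [flushSt, hsnoc, hh, ← h2', List.append_assoc]
      · have eB : streamStep (bs, as_, n) raw =
            (bs ++ [""] ++ ["// CONTEXT: " ++ headerOf raw],
             as_ ++ [""] ++ ["// CONTEXT: " ++ headerOf raw], n + 1) := by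
          simp [streamStep, hAt, hh, hn]
        rw [eB]
        refine ⟨fun hc => by simp at hc, ?_, ?_⟩
        · simp only [flushSt, if_true]
          rw [h1']; simp; ring
        · simp [hh] at hsnoc
          simp [flushSt, hsnoc, ← h2', List.append_assoc]
  · -- not a "@@" line
    simp at hAt
    cases inh with
    | false =>
      have hhs : hs = [] := h0 rfl
      subst hhs
      have hn0 : n = 0 := by simpa [flushSt] using h1
      subst hn0
      have eA : parseStep ([], "", [], [], false) raw = ([], "", [], [], false) := by
        simp [parseStep, hAt]
      have eB : streamStep (bs, as_, 0) raw = (bs, as_, 0) := by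
        simp [streamStep, hAt]
      -- the parse state's header/buffers are dead here but not necessarily ("",[],[]);
      -- handle the general state directly
      have eA' : parseStep ([], h, bl, al, false) raw = ([], h, bl, al, false) := by
        simp [parseStep, hAt]
      rw [eA', eB]; unfold InvAB
      exact ⟨h0, h1, h2⟩
    | true =>
      have h1' : n = ((hs ++ [(h, bl, al)]).length : Int) := by simpa [flushSt] using h1
      have h2' : (bs, as_) = renderPair p (hs ++ [(h, bl, al)]) := by simpa [flushSt] using h2
      have hn : n ≠ 0 := by rw [h1']; simp; omega
      by_cases c1 : PySem.Str.startswith raw "\\ No newline at end of file"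
      · have c1' := c1; simp at c1'
        have eA : parseStep (hs, h, bl, al, true) raw = (hs, h, bl, al, true) := by
          simp [parseStep, hAt, c1']
        have eB : streamStep (bs, as_, n) raw = (bs, as_, n) := by
          simp [streamStep, hAt, c1', hn]
        rw [eA, eB]; unfold InvAB
        exact ⟨h0, h1, h2⟩
      · have c1' := c1; simp at c1'
        by_cases c2a : PySem.Str.startswith raw "---"
        · have c2a' := c2a; simp at c2a'
          have eA : parseStep (hs, h, bl, al, true) raw = (hs, h, bl, al, true) := by
            simp [parseStep, hAt, c1', c2a']
          have eB : streamStep (bs, as_, n) raw = (bs, as_, n) := by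
            simp [streamStep, hAt, c1', c2a', hn]
          rw [eA, eB]; unfold InvAB
          exact ⟨h0, h1, h2⟩
        · have c2a' := c2a; simp at c2a'
          by_cases c2b : PySem.Str.startswith raw "+++"
          · have c2b' := c2b; simp at c2b'
            have eA : parseStep (hs, h, bl, al, true) raw = (hs, h, bl, al, true) := by
              simp [parseStep, hAt, c1', c2a', c2b']
            have eB : streamStep (bs, as_, n) raw = (bs, as_, n) := by
              simp [streamStep, hAt, c1', c2a', c2b', hn]
            rw [eA, eB]; unfold InvAB
            exact ⟨h0, h1, h2⟩
          · have c2b' := c2b; simp at c2b'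
            by_cases c3 : PySem.Str.startswith raw " "
            · have c3' := c3; simp at c3'
              have eA : parseStep (hs, h, bl, al, true) raw =
                  (hs, h, bl ++ [pyExpandtabs8 (tail1 raw)], al ++ [pyExpandtabs8 (tail1 raw)], true) := by
                simp [parseStep, hAt, c1', c2a', c2b', c3']
              have eB : streamStep (bs, as_, n) raw =
                  (bs ++ [pyExpandtabs8 (tail1 raw)], as_ ++ [pyExpandtabs8 (tail1 raw)], n) := by
                simp [streamStep, hAt, c1', c2a', c2b', c3', hn]
              rw [eA, eB]; unfold InvAB
              refine ⟨fun hc => by simp at hc, ?_, ?_⟩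
              · simp only [flushSt, if_true]
                rw [h1']; simp
              · simp only [flushSt, if_true]
                rw [renderPair_grow_both, ← h2']
            · have c3' := c3; simp at c3'
              by_cases c4 : PySem.Str.startswith raw "-"
              · have c4' := c4; simp at c4'
                have eA : parseStep (hs, h, bl, al, true) raw =
                    (hs, h, bl ++ [pyExpandtabs8 (tail1 raw)], al, true) := by
                  simp [parseStep, hAt, c1', c2a', c2b', c3', c4']
                have eB : streamStep (bs, as_, n) raw =
                    (bs ++ [pyExpandtabs8 (tail1 raw)], as_, n) := by
                  simp [streamStep, hAt, c1', c2a', c2b', c3', c4', hn]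
                rw [eA, eB]; unfold InvAB
                refine ⟨fun hc => by simp at hc, ?_, ?_⟩
                · simp only [flushSt, if_true]
                  rw [h1']; simp
                · simp only [flushSt, if_true]
                  rw [renderPair_grow_before, ← h2']
              · have c4' := c4; simp at c4'
                by_cases c5 : PySem.Str.startswith raw "+"
                · have c5' := c5; simp at c5'
                  have eA : parseStep (hs, h, bl, al, true) raw =
                      (hs, h, bl, al ++ [pyExpandtabs8 (tail1 raw)], true) := by
                    simp [parseStep, hAt, c1', c2a', c2b', c3', c4', c5']
                  have eB : streamStep (bs, as_, n) raw =
                      (bs, as_ ++ [pyExpandtabs8 (tail1 raw)], n) := by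
                    simp [streamStep, hAt, c1', c2a', c2b', c3', c4', c5', hn]
                  rw [eA, eB]; unfold InvAB
                  refine ⟨fun hc => by simp at hc, ?_, ?_⟩
                  · simp only [flushSt, if_true]
                    rw [h1']; simp
                  · simp only [flushSt, if_true]
                    rw [renderPair_grow_after, ← h2']
                · have c5' := c5; simp at c5'
                  have eA : parseStep (hs, h, bl, al, true) raw = (hs, h, bl, al, true) := by
                    simp [parseStep, hAt, c1', c2a', c2b', c3', c4', c5']
                  have eB : streamStep (bs, as_, n) raw = (bs, as_, n) := by
                    simp [streamStep, hAt, c1', c2a', c2b', c3', c4', c5', hn]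
                  rw [eA, eB]; unfold InvAB
                  exact ⟨h0, h1, h2⟩

lemma foldl_inv (p : String) (L : List String)
    (sa : List (String × List String × List String) × String × List String × List String × Bool)
    (sb : List String × List String × Int)
    (hI : InvAB p sa sb) : InvAB p (L.foldl parseStep sa) (L.foldl streamStep sb) := by
  induction L generalizing sa sb with
  | nil => exact hI
  | cons x xs ih => exact ih _ _ (step_inv p sa sb x hI)

-- ===== VERDICT (by name: the statement is the Claim_ definition above) =====
theorem render_file_snippets_spec : Claim_equal_render_file_snippets := by
  intro file_path diff_text _
  unfold Spec_render_file_snippets render_file_snippets render_file_snippets_alt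
  have hI : InvAB ("// FILE: " ++ file_path) ([], "", [], [], false)
      (["// FILE: " ++ file_path], ["// FILE: " ++ file_path], 0) := by
    refine ⟨fun _ => rfl, by simp [flushSt], ?_⟩
    simp [flushSt, renderPair]
  have := foldl_inv ("// FILE: " ++ file_path) (PySem.Str.splitlines diff_text) _ _ hI
  obtain ⟨-, -, h2⟩ := this
  simp only [parse_hunks]
  have hflush : flushSt ((PySem.Str.splitlines diff_text).foldl parseStep ([], "", [], [], false)) =
      (let fin := (PySem.Str.splitlines diff_text).foldl parseStep ([], "", [], [], false);
       if fin.2.2.2.2 then fin.1 ++ [(fin.2.1, fin.2.2.1, fin.2.2.2.1)] else fin.1) := rfl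
  rw [← hflush]
  have h2' := h2
  unfold renderPair at h2'
  obtain ⟨e1, e2⟩ := Prod.mk.injEq _ _ _ _ ▸ h2'
  rw [← e1, ← e2]
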